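-- pv_equiv track=rewrite | github.com/Sharad2001/Data-structures-and-algorithms | array_pair_sum_divisibility_problem.py | canPair
-- ===== SOURCE A (Python) =====
-- from collections import defaultdict
--
-- def canPair(nuns, k):
--     n = len(nuns)
--     if (n & 1):
--         return 0
--     freq = defaultdict(lambda: 0)
--     for i in range(0, n):
--         freq[((nuns[i] % k) + k) % k] += 1
--     for i in range(n):
--         rem = ((nuns[i] % k) + k) % k
--         if (2 * rem == k):
--             if (freq[rem] % 2 != 0):
--                 return 0
--         elif (rem == 0):
--             if (freq[rem] & 1):
--                 return 0
--         elif (freq[rem] != freq[k - rem]):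
--             return 0
--     return 1
-- ===== SOURCE B (Python) =====
-- def canPair(nuns, k):
--     if len(nuns) & 1:
--         return 0
--     pending = {}
--     for x in nuns:
--         r = ((x % k) + k) % k
--         c = (k - r) % k
--         if pending.get(c, 0) > 0:
--             pending[c] = pending[c] - 1
--         else:
--             pending[r] = pending.get(r, 0) + 1
--     return 1 if all(v == 0 for v in pending.values()) else 0
-- ===== Notes on version B (the rewrite author's own statement) =====
-- stated objective: alternative
-- what changed: B replaces A's count-then-verify scheme (build a full remainder frequency table, then re-scan every element checking parity/complement-count conditions) with a single-pass online greedy matching: each element either cancels a pending element of the complementary remainder class or becomes pending itself, and the answer is 1 iff nothing is left pending; greedy matching is correct because elements of the same remainder class are interchangeable partners.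
import Mathlib
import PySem

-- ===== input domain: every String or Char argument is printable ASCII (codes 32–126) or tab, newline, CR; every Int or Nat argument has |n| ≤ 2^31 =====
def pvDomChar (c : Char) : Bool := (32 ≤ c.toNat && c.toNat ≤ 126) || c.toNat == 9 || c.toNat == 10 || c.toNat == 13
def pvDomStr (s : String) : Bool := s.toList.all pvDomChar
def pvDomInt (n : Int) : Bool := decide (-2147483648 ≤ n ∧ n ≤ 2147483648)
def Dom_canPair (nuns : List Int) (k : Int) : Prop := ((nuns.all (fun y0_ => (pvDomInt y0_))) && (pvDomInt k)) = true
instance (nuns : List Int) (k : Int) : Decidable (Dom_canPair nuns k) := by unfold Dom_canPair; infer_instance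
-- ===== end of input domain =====

-- B replaces A's count-then-verify scheme by a single-pass online greedy matching
-- (objective: alternative algorithm, one pass instead of two).

-- ===== PORT A =====
-- ((x % k) + k) % k, Python % = PySem.Int.mod
def pyRem (x k : Int) : Int := PySem.Int.mod (PySem.Int.mod x k + k) k

-- A's second loop (early return 0). defaultdict reads are ported as getD … 0: a missing
-- key is inserted with value 0 by Python, which leaves every subsequent read unchanged,
-- so threading the mutated dict is value-for-value identical.
def canPairGo (freq : PySem.Dict Int Int) (k : Int) : List Int → Int
  | [] => 1
  | x :: xs =>
    let rem := pyRem x k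
    if 2 * rem = k then
      if PySem.Int.mod (freq.getD rem 0) 2 ≠ 0 then 0 else canPairGo freq k xs
    else if rem = 0 then
      if PySem.Int.band (freq.getD rem 0) 1 ≠ 0 then 0 else canPairGo freq k xs
    else if freq.getD rem 0 ≠ freq.getD (k - rem) 0 then 0
    else canPairGo freq k xs

def canPair (nuns : List Int) (k : Int) : Int :=
  let n := nuns.length
  if n % 2 = 1 then 0
  else
    let freq := nuns.foldl (fun d x => d.modify (pyRem x k) 0 (· + 1)) PySem.Dict.empty
    canPairGo freq k nuns

-- ===== PORT B =====
-- B's single pass: each element either cancels a pending element of the complementary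
-- remainder class or becomes pending itself
def bStep (k : Int) (d : PySem.Dict Int Int) (x : Int) : PySem.Dict Int Int :=
  let r := pyRem x k
  let c := PySem.Int.mod (k - r) k
  if d.getD c 0 > 0 then d.insert c (d.getD c 0 - 1)
  else d.insert r (d.getD r 0 + 1)

def canPair_alt (nuns : List Int) (k : Int) : Int :=
  if nuns.length % 2 = 1 then 0
  else
    let pending := nuns.foldl (bStep k) PySem.Dict.empty
    if pending.values.all (fun v => v == 0) then 1 else 0

-- ===== PRECONDITION & SPEC =====
-- Pre_ excludes exactly the inputs where Python A raises ZeroDivisionError: k = 0 with a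
-- nonempty even-length list (odd length returns 0 before any %, and [] runs no % at all).
def Pre_canPair (nuns : List Int) (k : Int) : Prop :=
  k ≠ 0 ∨ nuns = [] ∨ nuns.length % 2 = 1
instance (nuns : List Int) (k : Int) : Decidable (Pre_canPair nuns k) := by unfold Pre_canPair; infer_instance

def pvWitness_canPair : List Int × Int := ([1, 3, 2, 6], 4)

def Spec_canPair (nuns : List Int) (k : Int) (out : Int) : Prop := out = canPair_alt nuns k
instance (nuns : List Int) (k : Int) (out : Int) : Decidable (Spec_canPair nuns k out) := by unfold Spec_canPair; infer_instance

-- ===== CLAIM (what is proved, stated in full; the proofs are below) =====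
def Claim_equal_canPair : Prop := ∀ (nuns : List Int) (k : Int), Dom_canPair nuns k → Pre_canPair nuns k → Spec_canPair nuns k (canPair nuns k)

-- ===== LEMMAS AND PROOFS =====

-- canonical Python-remainder range for divisor k
def Canon (k r : Int) : Prop := (0 < k ∧ 0 ≤ r ∧ r < k) ∨ (k < 0 ∧ k < r ∧ r ≤ 0)

-- complement remainder class, B's (k - r) % k
def compR (k r : Int) : Int := PySem.Int.mod (k - r) k

-- the value of B's pending table at key r after processing remainders rs
def fInv (k : Int) (rs : List Int) (r : Int) : Nat :=
  if compR k r = r then rs.count r % 2 else rs.count r - rs.count (compR k r)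

-- the per-remainder-class check both algorithms decide, on counts of the remainder list
def remOkB (k : Int) (rs : List Int) (r : Int) : Bool :=
  if compR k r = r then rs.count r % 2 == 0 else rs.count r == rs.count (compR k r)

theorem canon_mod (k a : Int) (hk : k ≠ 0) : Canon k (PySem.Int.mod a k) := by
  rcases lt_or_gt_of_ne hk with h | h
  · exact Or.inr ⟨h, (PySem.Int.mod_neg_bounds a h).1, (PySem.Int.mod_neg_bounds a h).2⟩
  · exact Or.inl ⟨h, PySem.Int.mod_nonneg a h, PySem.Int.mod_lt a h⟩

theorem mod_eq_of (k a r : Int) (hk : k ≠ 0) (hr : Canon k r) (hdvd : k ∣ (a - r)) :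
    PySem.Int.mod a k = r := by
  have hm : Canon k (PySem.Int.mod a k) := canon_mod k a hk
  have h1 : k ∣ (a - PySem.Int.mod a k) := by
    have := PySem.Int.floordiv_mul_add_mod a k
    exact ⟨PySem.Int.floordiv a k, by linarith⟩
  have h2 : k ∣ (PySem.Int.mod a k - r) := by
    have := Int.dvd_sub hdvd h1
    have heq : (a - r) - (a - PySem.Int.mod a k) = PySem.Int.mod a k - r := by ring
    rwa [heq] at this
  have habs : |PySem.Int.mod a k - r| < |k| := by
    unfold Canon at hm hr
    rcases lt_or_gt_of_ne hk with hkn | hkp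
    · rw [abs_of_neg hkn, abs_lt]; omega
    · rw [abs_of_pos hkp, abs_lt]; omega
  have := Int.eq_zero_of_abs_lt_dvd ((abs_dvd k _).mpr h2) habs
  omega

theorem canon_pyRem (k x : Int) (hk : k ≠ 0) : Canon k (pyRem x k) := canon_mod k _ hk

theorem canon_compR (k r : Int) (hk : k ≠ 0) : Canon k (compR k r) := canon_mod k _ hk

theorem compR_compR (k r : Int) (hk : k ≠ 0) (hr : Canon k r) : compR k (compR k r) = r := by
  unfold compR
  apply mod_eq_of k _ r hk hr
  have h1 : k ∣ ((k - r) - PySem.Int.mod (k - r) k) := by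
    have := PySem.Int.floordiv_mul_add_mod (k - r) k
    exact ⟨PySem.Int.floordiv (k - r) k, by linarith⟩
  have heq : (k - PySem.Int.mod (k - r) k - r) = ((k - r) - PySem.Int.mod (k - r) k) := by ring
  rwa [heq]

theorem compR_self_iff (k r : Int) (hk : k ≠ 0) (hr : Canon k r) :
    compR k r = r ↔ (2 * r = k ∨ r = 0) := by
  constructor
  · intro h
    have h1 : k ∣ ((k - r) - r) := by
      have h2 : k ∣ ((k - r) - PySem.Int.mod (k - r) k) := by
        have := PySem.Int.floordiv_mul_add_mod (k - r) k
        exact ⟨PySem.Int.floordiv (k - r) k, by linarith⟩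
      unfold compR at h; rw [h] at h2; exact h2
    have h2 : k ∣ 2 * r := by
      have heq : 2 * r = k - ((k - r) - r) := by ring
      rw [heq]; exact Int.dvd_sub ⟨1, by ring⟩ h1
    rcases h2 with ⟨c, hc⟩
    unfold Canon at hr
    rcases hr with ⟨h, h1', h2'⟩ | ⟨h, h1', h2'⟩
    · have hc0 : 0 ≤ c := by nlinarith
      have hc2 : c < 2 := by nlinarith
      interval_cases c <;> omega
    · have hc0 : 0 ≤ c := by nlinarith
      have hc2 : c < 2 := by nlinarith
      interval_cases c <;> omega
  · intro h
    rcases h with h | h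
    · unfold compR
      exact mod_eq_of k _ r hk hr ⟨0, by omega⟩
    · subst h; unfold compR
      simp only [sub_zero]
      exact mod_eq_of k k 0 hk hr ⟨1, by ring⟩

theorem compR_eq_sub (k r : Int) (hk : k ≠ 0) (hr : Canon k r) (hne : r ≠ 0) :
    compR k r = k - r := by
  have hcan : Canon k (k - r) := by
    unfold Canon at hr ⊢
    rcases hr with ⟨h, h1, h2⟩ | ⟨h, h1, h2⟩
    · exact Or.inl ⟨h, by omega, by omega⟩
    · exact Or.inr ⟨h, by omega, by omega⟩
  exact mod_eq_of k (k - r) (k - r) hk hcan (by simp)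

-- ===== A-side characterization =====
theorem canPairGo_counter (rems : List Int) (k : Int) (hk : k ≠ 0) (l : List Int) :
    canPairGo (PySem.Dict.counter rems) k l
      = if l.all (fun x => remOkB k rems (pyRem x k)) then 1 else 0 := by
  induction l with
  | nil => simp [canPairGo]
  | cons x xs ih =>
    have hcx : Canon k (pyRem x k) := canon_pyRem k x hk
    have hiff := compR_self_iff k (pyRem x k) hk hcx
    rw [List.all_cons]
    have hstep : canPairGo (PySem.Dict.counter rems) k (x :: xs)
        = if remOkB k rems (pyRem x k) then canPairGo (PySem.Dict.counter rems) k xs else 0 := by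
      show (if 2 * pyRem x k = k then _ else _) = _
      by_cases h1 : 2 * pyRem x k = k
      · have hself : compR k (pyRem x k) = pyRem x k := hiff.mpr (Or.inl h1)
        rw [if_pos h1]
        simp only [remOkB, if_pos hself, PySem.Dict.getD_counter]
        split_ifs with h2 h3 <;> simp_all <;> omega
      · rw [if_neg h1]
        by_cases h2 : pyRem x k = 0
        · have hself : compR k (pyRem x k) = pyRem x k := hiff.mpr (Or.inr h2)
          rw [if_pos h2]
          simp only [remOkB, if_pos hself, PySem.Dict.getD_counter, PySem.Int.band_one]
          split_ifs with h3 h4 <;> simp_all <;> omega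
        · have hns : compR k (pyRem x k) ≠ pyRem x k := by
            intro h; rcases hiff.mp h with h' | h' <;> tauto
          have hsub : compR k (pyRem x k) = k - pyRem x k := compR_eq_sub k _ hk hcx h2
          rw [if_neg h2]
          simp only [remOkB, PySem.Dict.getD_counter, hsub]
          split_ifs with h3 h4 <;> simp_all
    rw [hstep, ih]
    by_cases h : remOkB k rems (pyRem x k) <;> simp [h]

-- ===== B-side: loop invariant of the greedy pass =====
def bStep2 (k : Int) (d : PySem.Dict Int Int) (r : Int) : PySem.Dict Int Int :=
  if d.getD (compR k r) 0 > 0 then d.insert (compR k r) (d.getD (compR k r) 0 - 1)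
  else d.insert r (d.getD r 0 + 1)

theorem cnt_app (rs : List Int) (r0 r : Int) :
    (rs ++ [r0]).count r = rs.count r + (if r0 = r then 1 else 0) := by
  rw [List.count_append]
  by_cases h : r0 = r
  · subst h; simp
  · simp [h]

theorem fInv_append_other (k : Int) (hk : k ≠ 0) (rs : List Int) (hC : ∀ r ∈ rs, Canon k r)
    (r0 r : Int) (h1 : r ≠ r0) (h2 : r ≠ compR k r0) :
    fInv k (rs ++ [r0]) r = fInv k rs r := by
  have hcr0 : (rs ++ [r0]).count r = rs.count r := by
    rw [cnt_app, if_neg (fun h => h1 h.symm)]; omega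
  by_cases hcan : Canon k r
  · have hcr : compR k r ≠ r0 := by
      intro h
      have := congrArg (compR k) h
      rw [compR_compR k r hk hcan] at this
      exact h2 this
    have hcrc : (rs ++ [r0]).count (compR k r) = rs.count (compR k r) := by
      rw [cnt_app, if_neg (fun h => hcr h.symm)]; omega
    unfold fInv
    rw [hcr0, hcrc]
  · have hselfn : compR k r ≠ r := fun h => hcan (h ▸ canon_compR k r hk)
    have hc0 : rs.count r = 0 := by
      by_contra h
      exact hcan (hC r (List.count_pos_iff.mp (Nat.pos_of_ne_zero h)))
    simp [fInv, hc0, hcr0]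

theorem bInv (k : Int) (hk : k ≠ 0) (rs : List Int) (hC : ∀ r ∈ rs, Canon k r) :
    (rs.foldl (bStep2 k) PySem.Dict.empty).keys.Nodup ∧
      ∀ r : Int, (rs.foldl (bStep2 k) PySem.Dict.empty).getD r 0 = (fInv k rs r : Int) := by
  induction rs using List.reverseRecOn with
  | nil =>
    refine ⟨by simp [PySem.Dict.keys_empty], fun r => ?_⟩
    simp [PySem.Dict.getD_empty, fInv]
  | append_singleton rs r0 ih =>
    have hC' : ∀ r ∈ rs, Canon k r := fun r hr => hC r (by simp [hr])
    have hr0 : Canon k r0 := hC r0 (by simp)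
    obtain ⟨hnd, hval⟩ := ih hC'
    rw [List.foldl_append, List.foldl_cons, List.foldl_nil]
    set d := rs.foldl (bStep2 k) PySem.Dict.empty with hd
    have hcc : compR k (compR k r0) = r0 := compR_compR k r0 hk hr0
    unfold bStep2
    by_cases hs : compR k r0 = r0
    · -- r0 is a self-paired class: the touched key is r0 itself in both branches
      rw [hs]
      have hfr0 : fInv k rs r0 = rs.count r0 % 2 := by
        unfold fInv; rw [if_pos hs]
      have hfr0' : fInv k (rs ++ [r0]) r0 = (rs.count r0 + 1) % 2 := by
        unfold fInv; rw [if_pos hs, cnt_app, if_pos rfl]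
      by_cases hpos : d.getD r0 0 > 0
      · rw [if_pos hpos]
        have hf : 0 < fInv k rs r0 := by rw [hval r0] at hpos; exact_mod_cast hpos
        refine ⟨PySem.Dict.nodup_keys_insert _ _ _ hnd, fun r => ?_⟩
        rw [PySem.Dict.getD_insert]
        by_cases hr : r = r0
        · subst hr
          rw [if_pos rfl, hval, hfr0']
          rw [hfr0] at hf ⊢
          omega
        · rw [if_neg hr, hval, fInv_append_other k hk rs hC' r0 r hr (by rw [hs]; exact hr)]
      · rw [if_neg hpos]
        have hf : fInv k rs r0 = 0 := by
          rw [hval r0] at hpos; omega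
        refine ⟨PySem.Dict.nodup_keys_insert _ _ _ hnd, fun r => ?_⟩
        rw [PySem.Dict.getD_insert]
        by_cases hr : r = r0
        · subst hr
          rw [if_pos rfl, hval, hfr0']
          rw [hfr0] at hf
          omega
        · rw [if_neg hr, hval, fInv_append_other k hk rs hC' r0 r hr (by rw [hs]; exact hr)]
    · -- r0 and its complement are distinct classes
      have hne0 : compR k r0 ≠ r0 := hs
      have hnsc : compR k (compR k r0) ≠ compR k r0 := by
        rw [hcc]; exact fun h => hs h.symm
      have hfc : fInv k rs (compR k r0) = rs.count (compR k r0) - rs.count r0 := by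
        unfold fInv; rw [if_neg hnsc, hcc]
      have hfc' : fInv k (rs ++ [r0]) (compR k r0)
          = rs.count (compR k r0) - (rs.count r0 + 1) := by
        unfold fInv
        rw [if_neg hnsc, hcc, cnt_app, cnt_app, if_pos rfl, if_neg (fun h => hne0 h.symm)]
        omega
      have hfr : fInv k rs r0 = rs.count r0 - rs.count (compR k r0) := by
        unfold fInv; rw [if_neg hs]
      have hfr' : fInv k (rs ++ [r0]) r0 = (rs.count r0 + 1) - rs.count (compR k r0) := by
        unfold fInv
        rw [if_neg hs, cnt_app, cnt_app, if_pos rfl, if_neg (fun h => hne0 h.symm)]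
        omega
      by_cases hpos : d.getD (compR k r0) 0 > 0
      · rw [if_pos hpos]
        have hf : 0 < fInv k rs (compR k r0) := by
          rw [hval (compR k r0)] at hpos; exact_mod_cast hpos
        rw [hfc] at hf
        refine ⟨PySem.Dict.nodup_keys_insert _ _ _ hnd, fun r => ?_⟩
        rw [PySem.Dict.getD_insert]
        by_cases hr : r = compR k r0
        · subst hr
          rw [if_pos rfl, hval, hfc, hfc']
          omega
        · rw [if_neg hr, hval]
          by_cases hrr0 : r = r0
          · subst hrr0
            rw [hfr, hfr']
            omega
          · rw [fInv_append_other k hk rs hC' r0 r hrr0 hr]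
      · rw [if_neg hpos]
        have hf : fInv k rs (compR k r0) = 0 := by
          rw [hval (compR k r0)] at hpos; omega
        rw [hfc] at hf
        refine ⟨PySem.Dict.nodup_keys_insert _ _ _ hnd, fun r => ?_⟩
        rw [PySem.Dict.getD_insert]
        by_cases hr : r = r0
        · subst hr
          rw [if_pos rfl, hval, hfr, hfr']
          omega
        · rw [if_neg hr, hval]
          by_cases hrc : r = compR k r0
          · subst hrc
            rw [hfc, hfc']
            omega
          · rw [fInv_append_other k hk rs hC' r0 r hr hrc]

-- all values zero ↔ every lookup is zero
theorem values_all_zero (d : PySem.Dict Int Int) (hnd : d.keys.Nodup) :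
    (d.values.all (fun v => v == 0) = true) ↔ ∀ r : Int, d.getD r 0 = 0 := by
  rw [PySem.Dict.values_eq_map_keys d hnd 0]
  simp only [List.all_map, List.all_eq_true, Function.comp, beq_iff_eq]
  constructor
  · intro h r
    by_cases hr : r ∈ d.keys
    · exact h r hr
    · refine PySem.Dict.getD_of_not_contains d 0 ?_
      rw [PySem.Dict.contains_eq_decide_mem_keys]; simpa using hr
  · intro h r _; exact h r

-- pending empty everywhere ↔ every remainder class passes the check
theorem fInv_zero_iff (k : Int) (hk : k ≠ 0) (rs : List Int) (hC : ∀ r ∈ rs, Canon k r) :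
    (∀ r : Int, fInv k rs r = 0) ↔ ∀ r ∈ rs, remOkB k rs r = true := by
  constructor
  · intro h r hr
    unfold remOkB
    by_cases hself : compR k r = r
    · have := h r
      simp only [fInv, if_pos hself] at this
      simp [if_pos hself, this]
    · have h1 := h r
      have h2 := h (compR k r)
      have hcc : compR k (compR k r) = r := compR_compR k r hk (hC r hr)
      have hns2 : compR k (compR k r) ≠ compR k r := by rw [hcc]; exact fun h => hself h.symm
      unfold fInv at h1 h2
      rw [if_neg hself] at h1
      rw [if_neg hns2, hcc] at h2
      simp only [if_neg hself, beq_iff_eq]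
      omega
  · intro h r
    unfold fInv
    by_cases hcnt : rs.count r = 0
    · simp [hcnt]
    · have hr : r ∈ rs := List.count_pos_iff.mp (Nat.pos_of_ne_zero hcnt)
      have := h r hr
      unfold remOkB at this
      by_cases hself : compR k r = r <;> simp_all

-- ===== VERDICT (by name: the statement is the Claim_ definition above) =====
theorem canPair_spec : Claim_equal_canPair := by
  intro nuns k _ hpre
  unfold Spec_canPair canPair canPair_alt
  by_cases hodd : nuns.length % 2 = 1
  · simp [hodd]
  · rcases eq_or_ne nuns [] with rfl | hne
    · rfl
    · have hk : k ≠ 0 := by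
        rcases hpre with h | h | h
        · exact h
        · exact absurd h hne
        · exact absurd h hodd
      simp only [hodd, if_false]
      set rems := nuns.map (fun x => pyRem x k) with hrems
      have hC : ∀ r ∈ rems, Canon k r := by
        intro r hr
        rw [hrems] at hr
        rcases List.mem_map.mp hr with ⟨x, _, rfl⟩
        exact canon_pyRem k x hk
      have hfreq : nuns.foldl (fun d x => d.modify (pyRem x k) 0 (· + 1)) PySem.Dict.empty
          = PySem.Dict.counter rems := by
        rw [hrems, PySem.Dict.counter_eq_foldl, List.foldl_map]
      rw [hfreq, canPairGo_counter rems k hk nuns]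
      have hfold : nuns.foldl (bStep k) PySem.Dict.empty
          = rems.foldl (bStep2 k) PySem.Dict.empty := by
        rw [hrems, List.foldl_map]; rfl
      rw [hfold]
      obtain ⟨hnd, hval⟩ := bInv k hk rems hC
      have hzero : ((rems.foldl (bStep2 k) PySem.Dict.empty).values.all (fun v => v == 0) = true)
          ↔ ∀ r ∈ rems, remOkB k rems r = true := by
        rw [values_all_zero _ hnd, ← fInv_zero_iff k hk rems hC]
        constructor
        · intro h r; have := h r; rw [hval r] at this; exact_mod_cast this
        · intro h r; rw [hval r]; exact_mod_cast h r
      have hall : (nuns.all (fun x => remOkB k rems (pyRem x k)) = true)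
          ↔ ∀ r ∈ rems, remOkB k rems r = true := by
        rw [hrems]
        simp [List.all_eq_true]
      by_cases h : ∀ r ∈ rems, remOkB k rems r = true
      · rw [if_pos (hall.mpr h), if_pos (hzero.mpr h)]
      · rw [if_neg (fun hh => h (hall.mp hh)), if_neg (fun hh => h (hzero.mp hh))]
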